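-- pv_equiv track=rewrite | github.com/jian-hao-chen/snakes-and-ladders | env.py | get_aisles
-- ===== SOURCE A (Python) =====
-- def get_aisles(size):
--     aisles = {
--         1: 38,
--         4: 14,
--         9: 31,
--         17: 7,
--         21: 42,
--         28: 84,
--         51: 67,
--         54: 34,
--         62: 19,
--         64: 60,
--         71: 91,
--         80: 100,
--         87: 24,
--         93: 73,
--         95: 75,
--         98: 79
--     }
--     if size == 'small':
--         return aisles
--     elif size == 'medium':
--         org_dict = aisles.copy()
--         for key, value in org_dict.items():
--             aisles[key + 100] = value + 100
--         return aisles
--     elif size == 'large':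
--         org_dict = aisles.copy()
--         for key, value in org_dict.items():
--             aisles[key + 100] = value + 100
--             aisles[key + 200] = value + 200
--         return aisles
--     else:
--         return aisles
-- ===== SOURCE B (Python) =====
-- AISLES_TABLE = {
--     'small': {1: 38, 4: 14, 9: 31, 17: 7, 21: 42, 28: 84, 51: 67, 54: 34, 62: 19, 64: 60, 71: 91, 80: 100, 87: 24, 93: 73, 95: 75, 98: 79},
--     'medium': {1: 38, 4: 14, 9: 31, 17: 7, 21: 42, 28: 84, 51: 67, 54: 34, 62: 19, 64: 60, 71: 91, 80: 100, 87: 24, 93: 73, 95: 75, 98: 79, 101: 138, 104: 114, 109: 131, 117: 107, 121: 142, 128: 184, 151: 167, 154: 134, 162: 119, 164: 160, 171: 191, 180: 200, 187: 124, 193: 173, 195: 175, 198: 179},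
--     'large': {1: 38, 4: 14, 9: 31, 17: 7, 21: 42, 28: 84, 51: 67, 54: 34, 62: 19, 64: 60, 71: 91, 80: 100, 87: 24, 93: 73, 95: 75, 98: 79, 101: 138, 201: 238, 104: 114, 204: 214, 109: 131, 209: 231, 117: 107, 217: 207, 121: 142, 221: 242, 128: 184, 228: 284, 151: 167, 251: 267, 154: 134, 254: 234, 162: 119, 262: 219, 164: 160, 264: 260, 171: 191, 271: 291, 180: 200, 280: 300, 187: 124, 287: 224, 193: 173, 293: 273, 195: 175, 295: 275, 198: 179, 298: 279},
-- }
--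
--
-- def get_aisles(size):
--     # Fixed board data: the three possible boards are precomputed literals;
--     # the function is a pure table lookup (a fresh copy per call).
--     return dict(AISLES_TABLE.get(size, AISLES_TABLE["small"]))
-- ===== Notes on version B (the rewrite author's own statement) =====
-- stated objective: alternative
-- what changed: Replaces A's run-time construction (branching and copy-then-mutate loops shifting entries by +100/+200) with a precomputed literal lookup table of the three possible boards; the function is a single table lookup with 'small' as the default, no loops or branches.
import Mathlib
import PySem

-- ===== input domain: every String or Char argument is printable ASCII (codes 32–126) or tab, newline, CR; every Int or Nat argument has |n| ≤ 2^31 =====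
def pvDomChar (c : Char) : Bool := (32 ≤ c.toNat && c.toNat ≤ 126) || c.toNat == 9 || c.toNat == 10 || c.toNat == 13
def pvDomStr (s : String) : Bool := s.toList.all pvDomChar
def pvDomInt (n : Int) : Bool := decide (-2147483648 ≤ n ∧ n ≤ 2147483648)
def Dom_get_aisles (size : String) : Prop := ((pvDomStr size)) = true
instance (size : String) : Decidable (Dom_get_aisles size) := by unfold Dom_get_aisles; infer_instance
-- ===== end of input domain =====

-- B replaces A's branching copy-then-mutate construction loops with a precomputed literal
-- lookup table of the three possible boards (objective: alternative); same cost, no speed claim.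
-- ===== PORT A =====
def get_aisles (size : String) : List (Int × Int) :=
  let aisles : PySem.Dict Int Int := PySem.Dict.ofList [((1:Int),(38:Int)),(4,14),(9,31),(17,7),(21,42),(28,84),(51,67),(54,34),(62,19),(64,60),(71,91),(80,100),(87,24),(93,73),(95,75),(98,79)]
  if size == "small" then aisles.items
  else if size == "medium" then
    let org_dict := aisles
    (org_dict.items.foldl (fun d (p : Int × Int) => d.insert (p.1 + 100) (p.2 + 100)) aisles).items
  else if size == "large" then
    let org_dict := aisles
    (org_dict.items.foldl
      (fun d (p : Int × Int) => (d.insert (p.1 + 100) (p.2 + 100)).insert (p.1 + 200) (p.2 + 200))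
      aisles).items
  else aisles.items

-- ===== PORT B =====
-- B: the three possible boards are precomputed literals; the function is a table lookup
-- with the 'small' board as the default.
def pvBoard_small : List (Int × Int) := [(1, 38), (4, 14), (9, 31), (17, 7), (21, 42), (28, 84), (51, 67), (54, 34), (62, 19), (64, 60), (71, 91), (80, 100), (87, 24), (93, 73), (95, 75), (98, 79)]
def pvBoard_medium : List (Int × Int) := [(1, 38), (4, 14), (9, 31), (17, 7), (21, 42), (28, 84), (51, 67), (54, 34), (62, 19), (64, 60), (71, 91), (80, 100), (87, 24), (93, 73), (95, 75), (98, 79), (101, 138), (104, 114), (109, 131), (117, 107), (121, 142), (128, 184), (151, 167), (154, 134), (162, 119), (164, 160), (171, 191), (180, 200), (187, 124), (193, 173), (195, 175), (198, 179)]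
def pvBoard_large : List (Int × Int) := [(1, 38), (4, 14), (9, 31), (17, 7), (21, 42), (28, 84), (51, 67), (54, 34), (62, 19), (64, 60), (71, 91), (80, 100), (87, 24), (93, 73), (95, 75), (98, 79), (101, 138), (201, 238), (104, 114), (204, 214), (109, 131), (209, 231), (117, 107), (217, 207), (121, 142), (221, 242), (128, 184), (228, 284), (151, 167), (251, 267), (154, 134), (254, 234), (162, 119), (262, 219), (164, 160), (264, 260), (171, 191), (271, 291), (180, 200), (280, 300), (187, 124), (287, 224), (193, 173), (293, 273), (195, 175), (295, 275), (198, 179), (298, 279)]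

def pvTable : PySem.Dict String (List (Int × Int)) :=
  PySem.Dict.ofList [("small", pvBoard_small), ("medium", pvBoard_medium), ("large", pvBoard_large)]

def get_aisles_alt (size : String) : List (Int × Int) :=
  pvTable.getD size (pvTable.getD "small" [])

-- ===== PRECONDITION & SPEC =====
def Spec_get_aisles (size : String) (out : List (Int × Int)) : Prop := out = get_aisles_alt size
instance (size : String) (out : List (Int × Int)) : Decidable (Spec_get_aisles size out) := by unfold Spec_get_aisles; infer_instance

-- ===== CLAIM =====
def Claim_equal_get_aisles : Prop := ∀ (size : String), Dom_get_aisles size → Spec_get_aisles size (get_aisles size)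

-- ===== LEMMAS AND PROOFS =====

-- ===== VERDICT =====
theorem get_aisles_spec : Claim_equal_get_aisles := by
  intro size _
  unfold Spec_get_aisles
  by_cases hs : size = "small"
  · subst hs; decide
  · by_cases hm : size = "medium"
    · subst hm; decide
    · by_cases hl : size = "large"
      · subst hl; decide
      · have hs' : (size == "small") = false := by simpa using hs
        have hm' : (size == "medium") = false := by simpa using hm
        have hl' : (size == "large") = false := by simpa using hl
        have htab : get_aisles_alt size = pvBoard_small := by
          simp [get_aisles_alt, pvTable, PySem.Dict.getD_eq_get?_getD, PySem.Dict.ofList,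
                PySem.Dict.update, PySem.Dict.get?_insert, hs, hm, hl]
        rw [htab]
        simp only [get_aisles, hs', hm', hl']
        decide
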